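-- pv_equiv track=rewrite | github.com/sprutxz/IntroToAI | Project2.py | extend_list
-- ===== SOURCE A (Python) =====
-- def extend_list(arr1, arr2, arr3):
--     for item in arr2[::-1]:
--         if item in arr1:
--             arr1.remove(item)
--             arr3.append(item)
--         if item in arr3:
--             arr2.remove(item)
--     arr1.extend(arr2)
--     return arr1, arr3
-- ===== SOURCE B (Python) =====
-- def extend_list(arr1, arr2, arr3):
--     # Count-based single pass: O(n) instead of A's O(n^2) scans/removes.
--     # Mutates arr1, arr2, arr3 in place like the original.
--     avail = {}
--     for x in arr1:
--         avail[x] = avail.get(x, 0) + 1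
--     in3 = set(arr3)
--     moved = []
--     drop1 = {}
--     drop2 = {}
--     for item in reversed(arr2):
--         if avail.get(item, 0) > 0:
--             avail[item] -= 1
--             drop1[item] = drop1.get(item, 0) + 1
--             moved.append(item)
--             in3.add(item)
--         if item in in3:
--             drop2[item] = drop2.get(item, 0) + 1
--     kept1 = []
--     for x in arr1:
--         if drop1.get(x, 0) > 0:
--             drop1[x] -= 1
--         else:
--             kept1.append(x)
--     kept2 = []
--     for x in arr2:
--         if drop2.get(x, 0) > 0:
--             drop2[x] -= 1
--         else:
--             kept2.append(x)
--     arr3.extend(moved)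
--     arr2[:] = kept2
--     arr1[:] = kept1 + kept2
--     return arr1, arr3
-- ===== Notes on version B (the rewrite author's own statement) =====
-- stated objective: faster
-- what changed: Replaced the per-item 'in'/remove scans over mutating lists with one count-based pass over reversed arr2 (a counter of arr1, a membership set of arr3, per-value drop counters) and linear passes that rebuild the surviving arr1/arr2 elements, reproducing the same per-value first-occurrence removals and orders.
import Mathlib
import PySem

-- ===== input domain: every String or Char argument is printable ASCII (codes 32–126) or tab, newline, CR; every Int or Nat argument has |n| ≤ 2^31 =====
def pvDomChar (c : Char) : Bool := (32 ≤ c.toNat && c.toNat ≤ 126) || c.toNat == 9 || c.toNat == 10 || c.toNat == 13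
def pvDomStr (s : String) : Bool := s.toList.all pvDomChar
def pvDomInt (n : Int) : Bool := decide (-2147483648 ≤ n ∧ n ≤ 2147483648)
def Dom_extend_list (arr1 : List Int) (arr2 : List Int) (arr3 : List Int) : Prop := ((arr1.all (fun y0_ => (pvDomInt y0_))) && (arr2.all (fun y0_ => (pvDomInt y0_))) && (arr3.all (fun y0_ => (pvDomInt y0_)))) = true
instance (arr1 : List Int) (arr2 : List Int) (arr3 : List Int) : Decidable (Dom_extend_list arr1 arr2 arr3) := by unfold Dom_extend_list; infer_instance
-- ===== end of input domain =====

-- B replaces A's quadratic in/remove scans by one count-based pass over reversed arr2 plus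
-- linear reconstruction passes (objective: faster). In Python both A and B mutate the argument
-- lists identically; the theorem below is about the returned pair.


-- ===== PORT A =====
-- for item in arr2[::-1]: mutate (arr1, arr2, arr3); then arr1.extend(arr2).
-- 'remove' is only reached when the element is present, so '(remove? …).getD' never takes its
-- fallback on a reachable state.
def extend_list (arr1 : List Int) (arr2 : List Int) (arr3 : List Int) : List Int × List Int :=
  let s := ((PySem.List.slice? arr2 none none (-1)).getD []).foldl
    (fun (s : List Int × List Int × List Int) (item : Int) =>
      let s1 :=
        if s.1.contains item then
          ((PySem.List.remove? s.1 item).getD s.1, s.2.1, s.2.2 ++ [item])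
        else s
      if s1.2.2.contains item then
        (s1.1, (PySem.List.remove? s1.2.1 item).getD s1.2.1, s1.2.2)
      else s1)
    (arr1, arr2, arr3)
  (s.1 ++ s.2.1, s.2.2)

-- ===== PORT B =====
-- state: (avail counter of arr1, member set of arr3, moved items, drop counters for arr1 and arr2)
def extend_list_alt (arr1 : List Int) (arr2 : List Int) (arr3 : List Int) : List Int × List Int :=
  let avail0 := arr1.foldl (fun d x => d.insert x (d.getD x 0 + 1)) PySem.Dict.empty
  let st := arr2.reverse.foldl
    (fun (s : PySem.Dict Int Int × PySem.Set Int × List Int × PySem.Dict Int Int × PySem.Dict Int Int) (item : Int) =>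
      let s1 :=
        if s.1.getD item 0 > 0 then
          (s.1.insert item (s.1.getD item 0 - 1),
           PySem.Set.add s.2.1 item,
           s.2.2.1 ++ [item],
           s.2.2.2.1.insert item (s.2.2.2.1.getD item 0 + 1),
           s.2.2.2.2)
        else s
      if PySem.Set.contains s1.2.1 item then
        (s1.1, s1.2.1, s1.2.2.1, s1.2.2.2.1, s1.2.2.2.2.insert item (s1.2.2.2.2.getD item 0 + 1))
      else s1)
    (avail0, PySem.Set.ofList arr3, ([] : List Int), PySem.Dict.empty, PySem.Dict.empty)
  let k1 := arr1.foldl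
    (fun (p : PySem.Dict Int Int × List Int) x =>
      if p.1.getD x 0 > 0 then (p.1.insert x (p.1.getD x 0 - 1), p.2) else (p.1, p.2 ++ [x]))
    (st.2.2.2.1, ([] : List Int))
  let k2 := arr2.foldl
    (fun (p : PySem.Dict Int Int × List Int) x =>
      if p.1.getD x 0 > 0 then (p.1.insert x (p.1.getD x 0 - 1), p.2) else (p.1, p.2 ++ [x]))
    (st.2.2.2.2, ([] : List Int))
  (k1.2 ++ k2.2, arr3 ++ st.2.2.1)

-- ===== PRECONDITION & SPEC =====
def Spec_extend_list (arr1 : List Int) (arr2 : List Int) (arr3 : List Int) (out : List Int × List Int) : Prop := out = extend_list_alt arr1 arr2 arr3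
instance (arr1 : List Int) (arr2 : List Int) (arr3 : List Int) (out : List Int × List Int) : Decidable (Spec_extend_list arr1 arr2 arr3 out) := by unfold Spec_extend_list; infer_instance

-- ===== CLAIM (what is proved, stated in full; the proofs are below) =====
def Claim_equal_extend_list : Prop := ∀ (arr1 : List Int) (arr2 : List Int) (arr3 : List Int), Dom_extend_list arr1 arr2 arr3 → Spec_extend_list arr1 arr2 arr3 (extend_list arr1 arr2 arr3)

-- ===== LEMMAS AND PROOFS =====

-- functional counters: proof-side abstraction of the drop dicts
def decF (d : Int → Nat) (v : Int) : Int → Nat := fun w => if w = v then d w - 1 else d w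
def bumpF (d : Int → Nat) (v : Int) : Int → Nat := fun w => if w = v then d w + 1 else d w

-- xs with, for each value w, its first (d w) occurrences removed
def keptF (d : Int → Nat) : List Int → List Int
  | [] => []
  | x :: xs => if d x = 0 then x :: keptF d xs else keptF (decF d x) xs

theorem keptF_zero (xs : List Int) : keptF (fun _ => 0) xs = xs := by
  induction xs with
  | nil => rfl
  | cons x xs ih => simp [keptF, ih]

theorem mem_keptF (d : Int → Nat) (xs : List Int) (v : Int) :
    v ∈ keptF d xs ↔ d v < xs.count v := by
  induction xs generalizing d with
  | nil => simp [keptF]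
  | cons x xs ih =>
      by_cases hx : d x = 0
      · rw [keptF, if_pos hx, List.mem_cons, ih]
        by_cases hv : v = x
        · subst hv; simp [List.count_cons, hx]
        · simp [hv, List.count_cons, Ne.symm hv]
      · rw [keptF, if_neg hx, ih]
        by_cases hv : v = x
        · subst hv
          have h2 : decF d v v = d v - 1 := by simp [decF]
          have h3 : (v :: xs).count v = xs.count v + 1 := by simp [List.count_cons]
          rw [h2, h3]; omega
        · have : decF d x v = d v := by simp [decF, hv]
          rw [this]; simp [List.count_cons, Ne.symm hv]

theorem remove?_keptF (d : Int → Nat) (xs : List Int) (v : Int) (h : d v < xs.count v) :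
    PySem.List.remove? (keptF d xs) v = some (keptF (bumpF d v) xs) := by
  induction xs generalizing d with
  | nil => simp at h
  | cons x xs ih =>
      by_cases hx : d x = 0
      · by_cases hv : x = v
        · subst hv
          have hb : ¬ bumpF d x x = 0 := by simp [bumpF]
          have hd : decF (bumpF d x) x = d := by
            funext w
            by_cases hw : w = x
            · simp [decF, bumpF, hw]
            · simp [decF, bumpF, hw]
          rw [keptF, if_pos hx, PySem.List.remove?_cons_self, keptF, if_neg hb, hd]
        · have hb : bumpF d v x = 0 := by simp [bumpF, hv, hx]
          have hxv : ¬ v = x := fun e => hv e.symm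
          have hcnt : d v < xs.count v := by
            have : (x :: xs).count v = xs.count v := by simp [List.count_cons, hv]
            omega
          rw [keptF, if_pos hx, PySem.List.remove?_cons_of_ne _ hv, ih d hcnt,
              Option.map_some, keptF, if_pos hb]
      · by_cases hv : x = v
        · subst hv
          have hb : ¬ bumpF d x x = 0 := by simp [bumpF]
          have hx1 : 1 ≤ d x := Nat.one_le_iff_ne_zero.mpr hx
          have hcnt : decF d x x < xs.count x := by
            have h3 : (x :: xs).count x = xs.count x + 1 := by simp [List.count_cons]
            have h2 : decF d x x = d x - 1 := by simp [decF]
            rw [h2]; omega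
          have hswap : decF (bumpF d x) x = bumpF (decF d x) x := by
            funext w
            by_cases hw : w = x
            · subst hw; simp [decF, bumpF]; omega
            · simp [decF, bumpF, hw]
          rw [keptF, if_neg hx, keptF, if_neg hb, hswap]
          exact ih (decF d x) hcnt
        · have hb : ¬ bumpF d v x = 0 := by simpa [bumpF, hv] using hx
          have hxv : ¬ v = x := fun e => hv e.symm
          have hswap : decF (bumpF d v) x = bumpF (decF d x) v := by
            funext w
            by_cases hw : w = x
            · subst hw; simp [decF, bumpF, hv, hxv]
            · by_cases hw2 : w = v
              · subst hw2; simp [decF, bumpF, hw, hxv]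
              · simp [decF, bumpF, hw, hw2]
          have hcnt : decF d x v < xs.count v := by
            have h1 : (x :: xs).count v = xs.count v := by simp [List.count_cons, hv]
            have h2 : decF d x v = d v := by simp [decF, hxv]
            omega
          rw [keptF, if_neg hx, keptF, if_neg hb, hswap]
          exact ih (decF d x) hcnt

-- the reconstruction loop body of B, named (definitionally the lambda in the port)
def kstep (p : PySem.Dict Int Int × List Int) (x : Int) : PySem.Dict Int Int × List Int :=
  if p.1.getD x 0 > 0 then (p.1.insert x (p.1.getD x 0 - 1), p.2) else (p.1, p.2 ++ [x])

-- B's "kept" reconstruction fold computes keptF of the dict read as a counter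
theorem foldKept_eq (xs : List Int) (D : PySem.Dict Int Int) (acc : List Int)
    (hD : ∀ w, 0 ≤ D.getD w 0) :
    (xs.foldl kstep (D, acc)).2 = acc ++ keptF (fun w => (D.getD w 0).toNat) xs := by
  induction xs generalizing D acc with
  | nil => simp [keptF]
  | cons x xs ih =>
      by_cases hx : D.getD x 0 > 0
      · have h0 : ¬ (fun w => (D.getD w 0).toNat) x = 0 := by simp; omega
        have hfun : (fun w => ((D.insert x (D.getD x 0 - 1)).getD w 0).toNat)
            = decF (fun w => (D.getD w 0).toNat) x := by
          funext w
          rw [PySem.Dict.getD_insert]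
          by_cases hw : w = x
          · rw [if_pos hw, hw]; simp [decF]
          · rw [if_neg hw]; simp [decF, hw]
        have hD' : ∀ w, 0 ≤ (D.insert x (D.getD x 0 - 1)).getD w 0 := by
          intro w; rw [PySem.Dict.getD_insert]
          by_cases hw : w = x
          · rw [if_pos hw]; omega
          · rw [if_neg hw]; exact hD w
        rw [List.foldl_cons, kstep, if_pos hx, keptF, if_neg h0, ← hfun]
        exact ih _ _ hD'
      · have h0 : (fun w => (D.getD w 0).toNat) x = 0 := by
          have := hD x; simp; omega
        rw [List.foldl_cons, kstep, if_neg hx, keptF, if_pos h0, ih D (acc ++ [x]) hD]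
        simp

-- the two loop bodies, named (definitionally equal to the lambdas in the ports)
def stepA (s : List Int × List Int × List Int) (item : Int) : List Int × List Int × List Int :=
  let s1 :=
    if s.1.contains item then
      ((PySem.List.remove? s.1 item).getD s.1, s.2.1, s.2.2 ++ [item])
    else s
  if s1.2.2.contains item then
    (s1.1, (PySem.List.remove? s1.2.1 item).getD s1.2.1, s1.2.2)
  else s1

def stepB (s : PySem.Dict Int Int × PySem.Set Int × List Int × PySem.Dict Int Int × PySem.Dict Int Int)
    (item : Int) : PySem.Dict Int Int × PySem.Set Int × List Int × PySem.Dict Int Int × PySem.Dict Int Int :=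
  let s1 :=
    if s.1.getD item 0 > 0 then
      (s.1.insert item (s.1.getD item 0 - 1),
       PySem.Set.add s.2.1 item,
       s.2.2.1 ++ [item],
       s.2.2.2.1.insert item (s.2.2.2.1.getD item 0 + 1),
       s.2.2.2.2)
    else s
  if PySem.Set.contains s1.2.1 item then
    (s1.1, s1.2.1, s1.2.2.1, s1.2.2.2.1, s1.2.2.2.2.insert item (s1.2.2.2.2.getD item 0 + 1))
  else s1

-- the coupling invariant between A's state and B's state, with `rest` of the loop still to run
def InvL (arr1 arr2 arr3 : List Int) (rest : List Int)
    (sA : List Int × List Int × List Int)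
    (sB : PySem.Dict Int Int × PySem.Set Int × List Int × PySem.Dict Int Int × PySem.Dict Int Int) : Prop :=
  sA.1 = keptF (fun w => (sB.2.2.2.1.getD w 0).toNat) arr1 ∧
  sA.2.1 = keptF (fun w => (sB.2.2.2.2.getD w 0).toNat) arr2 ∧
  sA.2.2 = arr3 ++ sB.2.2.1 ∧
  (∀ w, sB.1.getD w 0 = (arr1.count w : Int) - sB.2.2.2.1.getD w 0) ∧
  (∀ w, 0 ≤ sB.2.2.2.1.getD w 0 ∧ sB.2.2.2.1.getD w 0 ≤ (arr1.count w : Int)) ∧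
  (∀ w, w ∈ sB.2.1 ↔ w ∈ arr3 ++ sB.2.2.1) ∧
  (∀ w, 0 ≤ sB.2.2.2.2.getD w 0 ∧ sB.2.2.2.2.getD w 0 + (rest.count w : Int) ≤ (arr2.count w : Int))

theorem InvL_step (arr1 arr2 arr3 : List Int) (item : Int) (rest : List Int) (sA sB)
    (h : InvL arr1 arr2 arr3 (item :: rest) sA sB) :
    InvL arr1 arr2 arr3 rest (stepA sA item) (stepB sB item) := by
  obtain ⟨a1, a2, a3⟩ := sA
  obtain ⟨av, in3, mv, d1, d2⟩ := sB
  obtain ⟨h1, h2, h3, h4, h5, h6, h7⟩ := h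
  simp only at h1 h2 h3 h4 h5 h6 h7
  have hcnt2 : (d2.getD item 0).toNat < arr2.count item := by
    have h7' := h7 item
    have hcc : (item :: rest).count item = rest.count item + 1 := by simp [List.count_cons]
    omega
  by_cases hc : (d1.getD item 0).toNat < arr1.count item
  · -- the first branch fires in both programs, and then the second fires too
    have h5' := h5 item
    have hmemA : item ∈ a1 := by rw [h1, mem_keptF]; exact hc
    have havB : av.getD item 0 > 0 := by have h4' := h4 item; omega
    have hmem2 : item ∈ a3 ++ [item] := by simp
    have hstepA : stepA (a1, a2, a3) item
        = ((PySem.List.remove? a1 item).getD a1,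
           (PySem.List.remove? a2 item).getD a2, a3 ++ [item]) := by
      simp [stepA, hmemA, hmem2]
    have hsetB : item ∈ PySem.Set.add in3 item := by
      rw [PySem.Set.mem_add]; exact Or.inr rfl
    have hstepB : stepB (av, in3, mv, d1, d2) item
        = (av.insert item (av.getD item 0 - 1), PySem.Set.add in3 item, mv ++ [item],
           d1.insert item (d1.getD item 0 + 1), d2.insert item (d2.getD item 0 + 1)) := by
      simp [stepB, havB, hsetB, PySem.Set.contains]
    rw [hstepA, hstepB]
    have hf1 : (fun w => ((d1.insert item (d1.getD item 0 + 1)).getD w 0).toNat)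
        = bumpF (fun w => (d1.getD w 0).toNat) item := by
      funext w
      rw [PySem.Dict.getD_insert]
      by_cases hw : w = item
      · rw [if_pos hw, hw]; simp [bumpF]; omega
      · rw [if_neg hw]; simp [bumpF, hw]
    have hf2 : (fun w => ((d2.insert item (d2.getD item 0 + 1)).getD w 0).toNat)
        = bumpF (fun w => (d2.getD w 0).toNat) item := by
      funext w
      rw [PySem.Dict.getD_insert]
      by_cases hw : w = item
      · rw [if_pos hw, hw]; have := (h7 item).1; simp [bumpF]; omega
      · rw [if_neg hw]; simp [bumpF, hw]
    have hrem1 : PySem.List.remove? a1 item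
        = some (keptF (bumpF (fun w => (d1.getD w 0).toNat) item) arr1) := by
      rw [h1]; exact remove?_keptF _ _ _ hc
    have hrem2 : PySem.List.remove? a2 item
        = some (keptF (bumpF (fun w => (d2.getD w 0).toNat) item) arr2) := by
      rw [h2]; exact remove?_keptF _ _ _ hcnt2
    refine ⟨?_, ?_, ?_, ?_, ?_, ?_, ?_⟩
    · simp only [hrem1, Option.getD_some, hf1]
    · simp only [hrem2, Option.getD_some, hf2]
    · simp only [h3, List.append_assoc]
    · intro w
      simp only [hf1]
      rw [PySem.Dict.getD_insert, PySem.Dict.getD_insert]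
      by_cases hw : w = item
      · rw [if_pos hw, if_pos hw, hw]; have h4' := h4 item; omega
      · rw [if_neg hw, if_neg hw]; exact h4 w
    · intro w
      rw [PySem.Dict.getD_insert]
      by_cases hw : w = item
      · rw [if_pos hw, hw]; omega
      · rw [if_neg hw]; exact h5 w
    · intro w
      rw [PySem.Set.mem_add, h6 w]
      simp [List.mem_append]
      tauto
    · intro w
      rw [PySem.Dict.getD_insert]
      by_cases hw : w = item
      · subst hw
        rw [if_pos rfl]
        have h7' := h7 w
        have hcc : ((w :: rest).count w : Int) = (rest.count w : Int) + 1 := by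
          simp [List.count_cons]
        omega
      · rw [if_neg hw]
        have h7' := h7 w
        have hcc : ((item :: rest).count w : Int) = (rest.count w : Int) := by
          simp [List.count_cons, hw, Ne.symm hw]
        omega
  · -- the first branch is skipped in both programs
    have h5' := h5 item
    have hmemA : ¬ item ∈ a1 := by rw [h1, mem_keptF]; exact hc
    have havB : ¬ av.getD item 0 > 0 := by have h4' := h4 item; omega
    by_cases hm : item ∈ arr3 ++ mv
    · have hmA : item ∈ a3 := by rw [h3]; exact hm
      have hmB : item ∈ in3 := (h6 item).mpr hm
      have hstepA : stepA (a1, a2, a3) item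
          = (a1, (PySem.List.remove? a2 item).getD a2, a3) := by
        simp [stepA, hmemA, hmA]
      have hstepB : stepB (av, in3, mv, d1, d2) item
          = (av, in3, mv, d1, d2.insert item (d2.getD item 0 + 1)) := by
        simp [stepB, havB, hmB, PySem.Set.contains]
      rw [hstepA, hstepB]
      have hf2 : (fun w => ((d2.insert item (d2.getD item 0 + 1)).getD w 0).toNat)
          = bumpF (fun w => (d2.getD w 0).toNat) item := by
        funext w
        rw [PySem.Dict.getD_insert]
        by_cases hw : w = item
        · rw [if_pos hw, hw]; have := (h7 item).1; simp [bumpF]; omega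
        · rw [if_neg hw]; simp [bumpF, hw]
      have hrem2 : PySem.List.remove? a2 item
          = some (keptF (bumpF (fun w => (d2.getD w 0).toNat) item) arr2) := by
        rw [h2]; exact remove?_keptF _ _ _ hcnt2
      refine ⟨h1, ?_, h3, h4, h5, h6, ?_⟩
      · simp only [hrem2, Option.getD_some, hf2]
      · intro w
        rw [PySem.Dict.getD_insert]
        by_cases hw : w = item
        · subst hw
          rw [if_pos rfl]
          have h7' := h7 w
          have hcc : ((w :: rest).count w : Int) = (rest.count w : Int) + 1 := by
            simp [List.count_cons]
          omega
        · rw [if_neg hw]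
          have h7' := h7 w
          have hcc : ((item :: rest).count w : Int) = (rest.count w : Int) := by
            simp [List.count_cons, hw, Ne.symm hw]
          omega
    · have hmA : ¬ item ∈ a3 := by rw [h3]; exact hm
      have hmB : ¬ item ∈ in3 := fun hx => hm ((h6 item).mp hx)
      have hstepA : stepA (a1, a2, a3) item = (a1, a2, a3) := by
        simp [stepA, hmemA, hmA]
      have hstepB : stepB (av, in3, mv, d1, d2) item = (av, in3, mv, d1, d2) := by
        simp [stepB, havB, hmB, PySem.Set.contains]
      rw [hstepA, hstepB]
      refine ⟨h1, h2, h3, h4, h5, h6, ?_⟩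
      intro w
      dsimp only
      have h7' := h7 w
      by_cases hw : w = item
      · subst hw
        have hcc : ((w :: rest).count w : Int) = (rest.count w : Int) + 1 := by
          simp [List.count_cons]
        omega
      · have hcc : ((item :: rest).count w : Int) = (rest.count w : Int) := by
          simp [List.count_cons, hw, Ne.symm hw]
        omega

theorem InvL_fold (arr1 arr2 arr3 : List Int) (l : List Int) (sA sB)
    (h : InvL arr1 arr2 arr3 l sA sB) :
    InvL arr1 arr2 arr3 [] (l.foldl stepA sA) (l.foldl stepB sB) := by
  induction l generalizing sA sB with
  | nil => simpa using h
  | cons x l ih => exact ih _ _ (InvL_step _ _ _ _ _ _ _ h)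

-- ===== VERDICT (by name: the statement is the Claim_ definition above) =====
theorem extend_list_spec : Claim_equal_extend_list := by
  intro arr1 arr2 arr3 _
  show extend_list arr1 arr2 arr3 = extend_list_alt arr1 arr2 arr3
  have hinit : InvL arr1 arr2 arr3 arr2.reverse (arr1, arr2, arr3)
      (PySem.Dict.counter arr1, PySem.Set.ofList arr3, ([] : List Int),
       (PySem.Dict.empty : PySem.Dict Int Int), (PySem.Dict.empty : PySem.Dict Int Int)) := by
    have hz : (fun w => ((PySem.Dict.empty : PySem.Dict Int Int).getD w 0).toNat) = fun _ => 0 := by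
      funext w; simp [PySem.Dict.getD_empty]
    refine ⟨?_, ?_, ?_, ?_, ?_, ?_, ?_⟩
    · dsimp only; rw [hz, keptF_zero]
    · dsimp only; rw [hz, keptF_zero]
    · simp
    · intro w; dsimp only
      rw [PySem.Dict.getD_counter, PySem.Dict.getD_empty]; ring
    · intro w; dsimp only; rw [PySem.Dict.getD_empty]
      exact ⟨le_refl 0, Int.natCast_nonneg _⟩
    · intro w; dsimp only
      rw [PySem.Set.mem_ofList]; simp
    · intro w; dsimp only; rw [PySem.Dict.getD_empty, List.count_reverse]
      simp
  have hfin := InvL_fold arr1 arr2 arr3 arr2.reverse _ _ hinit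
  obtain ⟨g1, g2, g3, g4, g5, g6, g7⟩ := hfin
  -- LHS: A is the stepA fold (arr2[::-1] is arr2.reverse)
  have hL : extend_list arr1 arr2 arr3
      = ((arr2.reverse.foldl stepA (arr1, arr2, arr3)).1
          ++ (arr2.reverse.foldl stepA (arr1, arr2, arr3)).2.1,
         (arr2.reverse.foldl stepA (arr1, arr2, arr3)).2.2) := by
    unfold extend_list
    rw [PySem.List.slice?_none_none_neg_one]
    rfl
  -- RHS: B is the stepB fold followed by two kstep folds
  have hR : extend_list_alt arr1 arr2 arr3
      = ((arr1.foldl kstep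
            ((arr2.reverse.foldl stepB
              (PySem.Dict.counter arr1, PySem.Set.ofList arr3, ([] : List Int),
               PySem.Dict.empty, PySem.Dict.empty)).2.2.2.1, ([] : List Int))).2
          ++ (arr2.foldl kstep
            ((arr2.reverse.foldl stepB
              (PySem.Dict.counter arr1, PySem.Set.ofList arr3, ([] : List Int),
               PySem.Dict.empty, PySem.Dict.empty)).2.2.2.2, ([] : List Int))).2,
         arr3 ++ (arr2.reverse.foldl stepB
            (PySem.Dict.counter arr1, PySem.Set.ofList arr3, ([] : List Int),
             PySem.Dict.empty, PySem.Dict.empty)).2.2.1) := by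
    rfl
  rw [hL, hR,
      foldKept_eq arr1 _ [] (fun w => (g5 w).1),
      foldKept_eq arr2 _ [] (fun w => (g7 w).1),
      ← g1, ← g2, ← g3]
  simp
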